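-- pv_equiv track=rewrite | github.com/timohouben/GNN-XAI-TimeSeries-QualityControl | xai/libs/integrated_gradients.py | _get_confusion_matrix_indexes
-- ===== SOURCE A (Python) =====
-- def _get_confusion_matrix_indexes(true_values, predicted_values, configurations):
--     """
--     Get indexes based on the requested configurations of the confusion matrix.
--
--     Parameters:
--     - true_values: List of true values (0 or 1)
--     - predicted_values: List of predicted values (0 or 1)
--     - configurations: List of requested configurations (e.g., ['TP', 'FP'])
--
--     Returns:
--     - List of indexes corresponding to the requested configurations
--     """
--
--     # Initialize an empty list to store indexes
--     indexes = []
--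
--     # Iterate through the requested configurations and get the corresponding indexes
--     for config in configurations:
--         if config == "TP":
--             indexes.extend(
--                 [
--                     i
--                     for i, (t, p) in enumerate(zip(true_values, predicted_values))
--                     if t == 1 and p == 1
--                 ]
--             )
--         elif config == "TN":
--             indexes.extend(
--                 [
--                     i
--                     for i, (t, p) in enumerate(zip(true_values, predicted_values))
--                     if t == 0 and p == 0
--                 ]
--             )
--         elif config == "FP":
--             indexes.extend(
--                 [
--                     i
--                     for i, (t, p) in enumerate(zip(true_values, predicted_values))
--                     if t == 0 and p == 1
--                 ]
--             )
--         elif config == "FN":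
--             indexes.extend(
--                 [
--                     i
--                     for i, (t, p) in enumerate(zip(true_values, predicted_values))
--                     if t == 1 and p == 0
--                 ]
--             )
--
--     return indexes
-- ===== SOURCE B (Python) =====
-- def _get_confusion_matrix_indexes(true_values, predicted_values, configurations):
--     # Single bucketing pass, then per-config lookups (unknown configs yield nothing).
--     tp, tn, fp, fn = [], [], [], []
--     for i, (t, p) in enumerate(zip(true_values, predicted_values)):
--         if t == 1 and p == 1:
--             tp.append(i)
--         if t == 0 and p == 0:
--             tn.append(i)
--         if t == 0 and p == 1:
--             fp.append(i)
--         if t == 1 and p == 0: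
--             fn.append(i)
--     buckets = {"TP": tp, "TN": tn, "FP": fp, "FN": fn}
--     indexes = []
--     for config in configurations:
--         indexes.extend(buckets.get(config, []))
--     return indexes
-- ===== Notes on version B (the rewrite author's own statement) =====
-- stated objective: alternative
-- what changed: B replaces A's per-configuration filtering scans by a single bucketing pass that classifies each index into four lists, then emits buckets.get(config, []) per requested configuration.
import Mathlib
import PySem

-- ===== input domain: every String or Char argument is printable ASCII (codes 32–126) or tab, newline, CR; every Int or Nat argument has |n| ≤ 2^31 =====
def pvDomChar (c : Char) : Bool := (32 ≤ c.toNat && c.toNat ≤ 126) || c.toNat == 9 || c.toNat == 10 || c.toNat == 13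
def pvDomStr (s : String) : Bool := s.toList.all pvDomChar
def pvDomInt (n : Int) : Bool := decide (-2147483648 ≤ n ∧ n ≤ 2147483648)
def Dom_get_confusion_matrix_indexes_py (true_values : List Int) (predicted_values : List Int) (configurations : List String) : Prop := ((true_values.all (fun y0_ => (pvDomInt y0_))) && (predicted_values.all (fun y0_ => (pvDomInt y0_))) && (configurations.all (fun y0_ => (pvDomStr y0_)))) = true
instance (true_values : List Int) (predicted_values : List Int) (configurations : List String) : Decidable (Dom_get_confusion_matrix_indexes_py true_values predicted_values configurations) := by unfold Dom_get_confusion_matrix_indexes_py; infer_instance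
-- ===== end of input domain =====

-- B classifies the indexes into four buckets in a single pass and answers each configuration by a bucket lookup.
-- ===== PORT A =====
def get_confusion_matrix_indexes_py (true_values : List Int) (predicted_values : List Int) (configurations : List String) : List Int :=
  configurations.foldl (fun indexes config =>
    if config == "TP" then
      indexes ++ ((PySem.List.enumerate (true_values.zip predicted_values)).filter
        (fun x => x.2.1 == 1 && x.2.2 == 1)).map (·.1)
    else if config == "TN" then
      indexes ++ ((PySem.List.enumerate (true_values.zip predicted_values)).filter
        (fun x => x.2.1 == 0 && x.2.2 == 0)).map (·.1)
    else if config == "FP" then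
      indexes ++ ((PySem.List.enumerate (true_values.zip predicted_values)).filter
        (fun x => x.2.1 == 0 && x.2.2 == 1)).map (·.1)
    else if config == "FN" then
      indexes ++ ((PySem.List.enumerate (true_values.zip predicted_values)).filter
        (fun x => x.2.1 == 1 && x.2.2 == 0)).map (·.1)
    else indexes) []

-- ===== PORT B =====
-- one bucketing step per (index, (t, p)) pair: four independent conditional appends
def pvBucketStep (s : List Int × List Int × List Int × List Int) (x : Int × (Int × Int)) :
    List Int × List Int × List Int × List Int :=
  let (i, (t, p)) := x
  ((if t == 1 && p == 1 then s.1 ++ [i] else s.1),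
   (if t == 0 && p == 0 then s.2.1 ++ [i] else s.2.1),
   (if t == 0 && p == 1 then s.2.2.1 ++ [i] else s.2.2.1),
   (if t == 1 && p == 0 then s.2.2.2 ++ [i] else s.2.2.2))

def get_confusion_matrix_indexes_py_alt (true_values : List Int) (predicted_values : List Int) (configurations : List String) : List Int :=
  let b := (PySem.List.enumerate (true_values.zip predicted_values)).foldl pvBucketStep ([], [], [], [])
  let buckets : PySem.Dict String (List Int) :=
    PySem.Dict.ofList [("TP", b.1), ("TN", b.2.1), ("FP", b.2.2.1), ("FN", b.2.2.2)]
  configurations.foldl (fun indexes config => indexes ++ PySem.Dict.getD buckets config []) []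

-- ===== PRECONDITION & SPEC =====
def Spec_get_confusion_matrix_indexes_py (true_values : List Int) (predicted_values : List Int) (configurations : List String) (out : List Int) : Prop := out = get_confusion_matrix_indexes_py_alt true_values predicted_values configurations
instance (true_values : List Int) (predicted_values : List Int) (configurations : List String) (out : List Int) : Decidable (Spec_get_confusion_matrix_indexes_py true_values predicted_values configurations out) := by unfold Spec_get_confusion_matrix_indexes_py; infer_instance

-- ===== CLAIM (what is proved, stated in full; the proofs are below) =====
def Claim_equal_get_confusion_matrix_indexes_py : Prop := ∀ (true_values : List Int) (predicted_values : List Int) (configurations : List String), Dom_get_confusion_matrix_indexes_py true_values predicted_values configurations → Spec_get_confusion_matrix_indexes_py true_values predicted_values configurations (get_confusion_matrix_indexes_py true_values predicted_values configurations)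

-- ===== LEMMAS AND PROOFS =====
theorem pvBucketFold_eq (l : List (Int × (Int × Int))) (a b c d : List Int) :
    l.foldl pvBucketStep (a, b, c, d) =
      (a ++ (l.filter (fun x => x.2.1 == 1 && x.2.2 == 1)).map (·.1),
       b ++ (l.filter (fun x => x.2.1 == 0 && x.2.2 == 0)).map (·.1),
       c ++ (l.filter (fun x => x.2.1 == 0 && x.2.2 == 1)).map (·.1),
       d ++ (l.filter (fun x => x.2.1 == 1 && x.2.2 == 0)).map (·.1)) := by
  induction l generalizing a b c d with
  | nil => simp
  | cons x xs ih =>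
    obtain ⟨i, t, p⟩ := x
    simp only [List.foldl_cons, pvBucketStep, ih, List.filter_cons]
    split_ifs <;> simp_all

theorem pvBucketsGetD (v1 v2 v3 v4 : List Int) (config : String) :
    PySem.Dict.getD (PySem.Dict.ofList [("TP", v1), ("TN", v2), ("FP", v3), ("FN", v4)]) config [] =
      (if config == "TP" then v1 else if config == "TN" then v2
       else if config == "FP" then v3 else if config == "FN" then v4 else []) := by
  have h : PySem.Dict.ofList [("TP", v1), ("TN", v2), ("FP", v3), ("FN", v4)] =
      PySem.Dict.mk [("TP", v1), ("TN", v2), ("FP", v3), ("FN", v4)] := rfl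
  rw [h]
  simp only [PySem.Dict.getD, PySem.Dict.get?_mk_cons]
  split_ifs with h1 h2 h3 h4 <;> simp_all [PySem.Dict.get?]

theorem get_confusion_matrix_indexes_py_eq_alt (true_values : List Int) (predicted_values : List Int) (configurations : List String) :
    get_confusion_matrix_indexes_py true_values predicted_values configurations =
      get_confusion_matrix_indexes_py_alt true_values predicted_values configurations := by
  unfold get_confusion_matrix_indexes_py get_confusion_matrix_indexes_py_alt
  rw [pvBucketFold_eq]
  apply PySem.List.foldl_congr_mem
  intro acc config _
  rw [pvBucketsGetD]
  split_ifs with h1 h2 h3 h4 <;> simp_all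

-- ===== VERDICT (by name: the statement is the Claim_ definition above) =====
theorem get_confusion_matrix_indexes_py_spec : Claim_equal_get_confusion_matrix_indexes_py := by
  intro tv pv cfgs _
  exact get_confusion_matrix_indexes_py_eq_alt tv pv cfgs
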